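-- pv_equiv track=rewrite | github.com/athulya24453/Mathematics_Algorithms | Combinatorics/InclusionExclusion.py | inclusion_exclusion
-- ===== SOURCE A (Python) =====
-- def inclusion_exclusion(sets):
--     '''
--     Finds the size of elements in the union of sets
--     Args:
--         sets - Array of all sets
--     Returns:
--         Number of elements in the union
--     '''
--     n = len(sets)
--     result = 0
--
--     for subset_size in range(1, n+1):
--         subsets = generate_subsets(sets, subset_size)
--         for subset in subsets:
--             intersection_size = count_intersection(subset)
--             if subset_size % 2 == 1:
--                 result += intersection_size
--             else:
--                 result -= intersection_size
--
--     return result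
--
-- def generate_subsets(sets, subset_size):
--     # Helper function to generate all subsets of a given size
--     from itertools import combinations
--     return list(combinations(sets, subset_size))
--
-- def count_intersection(subset):
--     # Helper function to count the number of elements in the intersection of the subset
--     intersection = subset[0]
--     for s in subset[1:]:
--         intersection = intersection.intersection(s)
--     return len(intersection)
-- ===== SOURCE B (Python) =====
-- def inclusion_exclusion(sets):
--     '''
--     Finds the size of elements in the union of sets
--     Args:
--         sets - Array of all sets
--     Returns:
--         Number of elements in the union
--     '''
--     union = set()
--     for s in sets:
--         union |= s
--     return len(union)
-- ===== Notes on version B (the rewrite author's own statement) =====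
-- stated objective: faster
-- what changed: Replaces the alternating inclusion-exclusion sum over all 2^n - 1 nonempty subfamilies by directly accumulating the union of the sets and returning its size.
import Mathlib
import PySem

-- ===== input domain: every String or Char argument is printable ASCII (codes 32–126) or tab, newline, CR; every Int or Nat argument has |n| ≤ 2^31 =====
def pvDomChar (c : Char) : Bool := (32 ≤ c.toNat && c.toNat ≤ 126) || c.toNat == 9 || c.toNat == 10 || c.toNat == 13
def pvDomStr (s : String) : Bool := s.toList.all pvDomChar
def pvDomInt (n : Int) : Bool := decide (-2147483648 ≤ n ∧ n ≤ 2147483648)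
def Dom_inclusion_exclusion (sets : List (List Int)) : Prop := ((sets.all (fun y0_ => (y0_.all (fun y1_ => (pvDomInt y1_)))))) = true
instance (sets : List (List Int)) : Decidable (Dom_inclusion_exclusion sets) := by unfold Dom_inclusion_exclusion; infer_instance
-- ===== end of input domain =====

-- B replaces A's alternating inclusion-exclusion sum over all nonempty subfamilies by a single
-- accumulation of the union of the sets; objective: faster (asymptotic).

-- ===== PORT A =====
-- count_intersection: subset[0] would raise on an empty tuple, but every generated subset
-- has size ≥ 1, so the [] branch is never reached (its value is arbitrary).
def pvCountIntersection (subset : List (List Int)) : Int :=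
  match subset with
  | [] => 0
  | x :: rest =>
      ((rest.foldl (fun inter s => inter.filter (fun a => s.contains a)) x).length : Int)

-- generate_subsets = list(itertools.combinations(sets, subset_size))
def pvGenerateSubsets (sets : List (List Int)) (subset_size : Int) : List (List (List Int)) :=
  PySem.List.combinations sets subset_size.toNat

def inclusion_exclusion (sets : List (List Int)) : Int :=
  let n : Int := (sets.length : Int)
  (PySem.List.pyRange 1 (n + 1)).foldl (fun result subset_size =>
    (pvGenerateSubsets sets subset_size).foldl (fun result subset =>
      let intersection_size := pvCountIntersection subset
      if PySem.Int.mod subset_size 2 = 1 then result + intersection_size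
      else result - intersection_size) result) 0

-- ===== PORT B =====
def inclusion_exclusion_alt (sets : List (List Int)) : Int :=
  ((sets.foldl (fun union s => PySem.Set.union union s) (PySem.Set.empty : PySem.Set Int)).length : Int)

-- ===== PRECONDITION & SPEC =====
-- Pre_: the argument has Python type list[set[int]]; under the type convention each inner set is
-- encoded as a list of DISTINCT elements, so Pre_ states exactly that encoding invariant.
-- It excludes no input a Python caller can form (a Python set never holds duplicate elements).
def Pre_inclusion_exclusion (sets : List (List Int)) : Prop := ∀ l ∈ sets, l.Nodup
instance (sets : List (List Int)) : Decidable (Pre_inclusion_exclusion sets) := by unfold Pre_inclusion_exclusion; infer_instance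

def pvWitness_inclusion_exclusion : List (List Int) := [[1, 2], [2, 3]]

def Spec_inclusion_exclusion (sets : List (List Int)) (out : Int) : Prop := out = inclusion_exclusion_alt sets
instance (sets : List (List Int)) (out : Int) : Decidable (Spec_inclusion_exclusion sets out) := by unfold Spec_inclusion_exclusion; infer_instance

-- ===== CLAIM (what is proved, stated in full; the proofs are below) =====
def Claim_equal_inclusion_exclusion : Prop := ∀ (sets : List (List Int)), Dom_inclusion_exclusion sets → Pre_inclusion_exclusion sets → Spec_inclusion_exclusion sets (inclusion_exclusion sets)

-- ===== LEMMAS AND PROOFS =====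

-- the Finset-level picture: intersection of a nonempty family, union of a family
def pvInter (x : Finset Int) (c : List (Finset Int)) : Finset Int := c.foldl (· ∩ ·) x

def pvUnion (c : List (Finset Int)) : Finset Int := c.foldr (· ∪ ·) ∅

-- the inclusion-exclusion summand of one subfamily ([] contributes 0)
def pvF (c : List (Finset Int)) : Int :=
  match c with
  | [] => 0
  | x :: rest => (-1 : Int) ^ rest.length * ((pvInter x rest).card : Int)

theorem pv_card_split (x y U : Finset Int) :
    ((x \ (y ∪ U)).card : Int) = ((x \ U).card : Int) - (((x ∩ y) \ U).card : Int) := by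
  have hsub : (x ∩ y) \ U ⊆ x \ U := by
    intro a ha; simp only [Finset.mem_sdiff, Finset.mem_inter] at *; tauto
  have hset : (x \ U) \ ((x ∩ y) \ U) = x \ (y ∪ U) := by
    ext a; simp only [Finset.mem_sdiff, Finset.mem_inter, Finset.mem_union]; tauto
  have := Finset.card_sdiff_add_card_eq_card hsub
  rw [hset] at this
  omega

theorem pv_sum_map_neg {α : Type} (l : List α) (f : α → Int) :
    ((l.map (fun c => -(f c))).sum) = -((l.map f).sum) := by
  induction l with
  | nil => simp
  | cons a t ih => simp [ih]; ring

-- ∑_{c ⊆ ys} (-1)^|c| |x ∩ ⋂c| = |x \ ⋃ys|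
theorem pv_altSum (ys : List (Finset Int)) :
    ∀ x : Finset Int,
      ((ys.sublists'.map (fun c => (-1 : Int) ^ c.length * ((pvInter x c).card : Int))).sum)
        = ((x \ pvUnion ys).card : Int) := by
  induction ys with
  | nil => intro x; simp [pvUnion, pvInter]
  | cons y ys ih =>
      intro x
      rw [List.sublists'_cons]
      simp only [List.map_append, List.map_map, List.sum_append]
      have h1 : ((ys.sublists'.map ((fun c => (-1 : Int) ^ c.length * ((pvInter x c).card : Int)) ∘ (y :: ·))).sum)
          = -((ys.sublists'.map (fun c => (-1 : Int) ^ c.length * ((pvInter (x ∩ y) c).card : Int))).sum) := by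
        rw [← pv_sum_map_neg]
        apply congrArg
        apply List.map_congr_left
        intro c _
        simp only [Function.comp, List.length_cons, pow_succ]
        have : pvInter x (y :: c) = pvInter (x ∩ y) c := rfl
        rw [this]
        ring
      rw [h1, ih x, ih (x ∩ y)]
      show _ = ((x \ pvUnion (y :: ys)).card : Int)
      have : pvUnion (y :: ys) = y ∪ pvUnion ys := rfl
      rw [this, pv_card_split]; ring

-- ∑_{c ⊆ ys} pvF c = |⋃ys|
theorem pv_sublists_sum (ys : List (Finset Int)) :
    ((ys.sublists'.map pvF).sum) = ((pvUnion ys).card : Int) := by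
  induction ys with
  | nil => simp [pvF, pvUnion]
  | cons y ys ih =>
      rw [List.sublists'_cons]
      simp only [List.map_append, List.map_map, List.sum_append]
      rw [ih]
      have h1 : ((ys.sublists'.map (pvF ∘ (y :: ·))).sum)
          = ((ys.sublists'.map (fun c => (-1 : Int) ^ c.length * ((pvInter y c).card : Int))).sum) := by
        apply congrArg
        apply List.map_congr_left
        intro c _
        rfl
      rw [h1, pv_altSum]
      have h2 : pvUnion (y :: ys) = y ∪ pvUnion ys := rfl
      rw [h2]
      have := Finset.card_sdiff_add_card (y) (pvUnion ys)
      omega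

-- combinations xs r enumerates the same subfamilies as sublistsLen r xs
theorem pv_combinations_perm {α : Type} (xs : List α) : ∀ (r : ℕ),
    (PySem.List.combinations xs r).Perm (List.sublistsLen r xs) := by
  induction xs with
  | nil =>
      intro r
      cases r with
      | zero => simp [PySem.List.combinations_zero]
      | succ r => simp [PySem.List.combinations_nil_succ]
  | cons x xs ih =>
      intro r
      cases r with
      | zero => simp [PySem.List.combinations_zero]
      | succ r =>
          rw [PySem.List.combinations_cons_succ, List.sublistsLen_succ_cons]
          exact List.perm_append_comm.trans
            (List.Perm.append (ih (r+1)) ((ih r).map (x :: ·)))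

-- A-side: the concrete filter chain is Nodup and realises the Finset intersection
theorem pv_filter_chain (rest : List (List Int)) : ∀ (x : List Int), x.Nodup →
    (rest.foldl (fun inter s => inter.filter (fun a => s.contains a)) x).Nodup ∧
    (rest.foldl (fun inter s => inter.filter (fun a => s.contains a)) x).toFinset
      = pvInter x.toFinset (rest.map List.toFinset) := by
  induction rest with
  | nil => intro x hx; exact ⟨hx, rfl⟩
  | cons s rest ih =>
      intro x hx
      have hstep : (x.filter (fun a => s.contains a)).toFinset = x.toFinset ∩ s.toFinset := by
        ext a
        simp [List.mem_toFinset]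
      have hnd : (x.filter (fun a => s.contains a)).Nodup := hx.filter _
      obtain ⟨h1, h2⟩ := ih _ hnd
      refine ⟨h1, ?_⟩
      rw [List.foldl_cons, h2, hstep]
      rfl

theorem pv_count_eq (x : List Int) (rest : List (List Int)) (hx : x.Nodup) :
    pvCountIntersection (x :: rest)
      = ((pvInter x.toFinset (rest.map List.toFinset)).card : Int) := by
  obtain ⟨h1, h2⟩ := pv_filter_chain rest x hx
  show ((rest.foldl (fun inter s => inter.filter (fun a => s.contains a)) x).length : Int) = _
  rw [← h2, List.toFinset_card_of_nodup h1]

-- one pass of A's outer loop adds a signed sum of intersection sizes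
theorem pv_inner (sets : List (List Int)) (k : Int) (r : Int) :
    (pvGenerateSubsets sets k).foldl (fun result subset =>
        let intersection_size := pvCountIntersection subset
        if PySem.Int.mod k 2 = 1 then result + intersection_size
        else result - intersection_size) r
      = r + (if PySem.Int.mod k 2 = 1 then (1:Int) else -1)
              * ((pvGenerateSubsets sets k).map pvCountIntersection).sum := by
  by_cases h : PySem.Int.mod k 2 = 1
  · simp only [h, if_true]
    rw [PySem.List.foldl_add]
    ring
  · simp only [h, if_false]
    have : (pvGenerateSubsets sets k).foldl (fun result subset => result - pvCountIntersection subset) r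
        = (pvGenerateSubsets sets k).foldl (fun result subset => result + (-(pvCountIntersection subset))) r := by
      apply PySem.List.foldl_congr_mem
      intro acc x _
      ring
    rw [this, PySem.List.foldl_add, pv_sum_map_neg]
    ring

-- range(1, n+1) as a mapped Nat range
theorem pv_range (n : ℕ) :
    PySem.List.pyRange 1 ((n : Int) + 1) = (List.range n).map (fun i : ℕ => ((i : Int) + 1)) := by
  induction n with
  | zero => rfl
  | succ n ih =>
      have h1 : ((n + 1 : ℕ) : Int) + 1 = ((n : Int) + 1) + 1 := by push_cast; ring
      rw [h1, PySem.List.pyRange_one_succ_right (by omega), ih, List.range_succ]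
      simp

theorem pv_sign (m : ℕ) : (if (m + 1) % 2 = 1 then (1:Int) else -1) = (-1 : Int) ^ m := by
  rcases Nat.even_or_odd m with h | h
  · have h2 := Nat.even_iff.mp h
    rw [h.neg_one_pow]
    have : (m + 1) % 2 = 1 := by omega
    simp [this]
  · have h2 := Nat.odd_iff.mp h
    rw [h.neg_one_pow]
    have : ¬ (m + 1) % 2 = 1 := by omega
    simp [this]

-- the k-th signed sum of A equals the pvF-sum over the size-k subfamilies of the Finset family
theorem pv_k (sets : List (List Int)) (hnd : ∀ l ∈ sets, l.Nodup) (k : ℕ) :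
    (if k % 2 = 1 then (1:Int) else -1) * ((PySem.List.combinations sets k).map pvCountIntersection).sum
      = ((PySem.List.combinations (sets.map List.toFinset) k).map pvF).sum := by
  rw [PySem.List.combinations_map, List.map_map, ← List.sum_map_mul_left]
  apply congrArg
  apply List.map_congr_left
  intro c hc
  obtain ⟨hsub, hlen⟩ := (PySem.List.mem_combinations_iff sets k c).mp hc
  cases c with
  | nil =>
      simp only [pvCountIntersection, Function.comp, List.map_nil, pvF]
      have : ¬ (0 : ℕ) % 2 = 1 := by omega
      simp [← hlen, this]
  | cons x rest =>
      have hx : x.Nodup := hnd x (hsub.subset (List.mem_cons_self ..))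
      rw [pv_count_eq x rest hx]
      show _ * _ = pvF (x.toFinset :: rest.map List.toFinset)
      simp only [pvF, List.length_map, ← hlen, List.length_cons, pv_sign]

theorem pv_sum_flatMap {α : Type} (l : List α) (g : α → List (List (Finset Int))) :
    (((l.flatMap g).map pvF).sum) = ((l.map (fun k => ((g k).map pvF).sum)).sum) := by
  induction l with
  | nil => simp
  | cons a t ih => simp [ih]

-- A's whole loop as the pvF-sum over all subfamilies of the mapped family
theorem pv_A_eq (sets : List (List Int)) (hnd : ∀ l ∈ sets, l.Nodup) :
    inclusion_exclusion sets
      = (((sets.map List.toFinset).sublists'.map pvF).sum) := by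
  show (PySem.List.pyRange 1 ((sets.length : Int) + 1)).foldl _ 0 = _
  rw [PySem.List.foldl_congr_mem _ _
    (fun result k => result + (if PySem.Int.mod k 2 = 1 then (1:Int) else -1)
      * ((pvGenerateSubsets sets k).map pvCountIntersection).sum) 0
    (fun acc x _ => pv_inner sets x acc)]
  rw [PySem.List.foldl_add, pv_range, List.map_map, zero_add]
  have hstep : ∀ i ∈ List.range sets.length,
      ((fun k => (if PySem.Int.mod k 2 = 1 then (1:Int) else -1)
          * ((pvGenerateSubsets sets k).map pvCountIntersection).sum) ∘ (fun i : ℕ => ((i : Int) + 1))) i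
        = ((PySem.List.combinations (sets.map List.toFinset) (i + 1)).map pvF).sum := by
    intro i _
    have htn : (((i : Int) + 1)).toNat = i + 1 := by omega
    have hmod : PySem.Int.mod ((i : Int) + 1) 2 = (((i + 1) % 2 : ℕ) : Int) := by
      have h := PySem.Int.mod_natCast (i + 1) 2
      push_cast at h ⊢
      exact h
    have hiff : (PySem.Int.mod ((i : Int) + 1) 2 = 1) ↔ ((i + 1) % 2 = 1) := by
      rw [hmod]
      constructor <;> intro h <;> omega
    show (if PySem.Int.mod ((i : Int) + 1) 2 = 1 then (1:Int) else -1)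
        * ((pvGenerateSubsets sets ((i : Int) + 1)).map pvCountIntersection).sum = _
    rw [if_congr hiff rfl rfl]
    show _ * ((PySem.List.combinations sets (((i : Int) + 1)).toNat).map pvCountIntersection).sum = _
    rw [htn]
    exact pv_k sets hnd (i + 1)
  rw [List.map_congr_left hstep]
  have hr : ((List.range (sets.length + 1)).map
        (fun k => ((PySem.List.combinations (sets.map List.toFinset) k).map pvF).sum)).sum
      = ((List.range sets.length).map
        (fun i => ((PySem.List.combinations (sets.map List.toFinset) (i + 1)).map pvF).sum)).sum := by
    rw [List.range_succ_eq_map]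
    simp only [List.map_cons, List.map_map, List.sum_cons, PySem.List.combinations_zero,
      List.map_nil, pvF, List.sum_nil, zero_add]
    exact congrArg List.sum (List.map_congr_left (fun i _ => rfl))
  rw [← hr]
  have hsl : ∀ k ∈ List.range (sets.length + 1),
      ((PySem.List.combinations (sets.map List.toFinset) k).map pvF).sum
        = ((List.sublistsLen k (sets.map List.toFinset)).map pvF).sum :=
    fun k _ => ((pv_combinations_perm (sets.map List.toFinset) k).map pvF).sum_eq
  rw [List.map_congr_left hsl, ← pv_sum_flatMap]
  have hlen : (sets.map List.toFinset).length = sets.length := List.length_map ..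
  have hperm := ((List.range_bind_sublistsLen_perm (sets.map List.toFinset)).map pvF).sum_eq
  rw [hlen] at hperm
  exact hperm

-- B-side: the accumulated PySem.Set is Nodup and realises the Finset union
theorem pv_union_chain (sets : List (List Int)) : ∀ (u : PySem.Set Int), u.Nodup →
    (sets.foldl (fun union s => PySem.Set.union union s) u).Nodup ∧
    (sets.foldl (fun union s => PySem.Set.union union s) u).toFinset
      = u.toFinset ∪ pvUnion (sets.map List.toFinset) := by
  induction sets with
  | nil => intro u hu; simpa [pvUnion] using hu
  | cons s sets ih =>
      intro u hu
      obtain ⟨h1, h2⟩ := ih (u.union s) (PySem.Set.nodup_union u s hu)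
      refine ⟨h1, ?_⟩
      rw [List.foldl_cons, h2]
      have ht : (PySem.Set.union u s).toFinset = u.toFinset ∪ s.toFinset := by
        ext a
        simp [List.mem_toFinset, PySem.Set.mem_union]
      rw [ht]
      show _ = u.toFinset ∪ (s.toFinset ∪ pvUnion (sets.map List.toFinset))
      rw [Finset.union_assoc]

theorem pv_B_eq (sets : List (List Int)) :
    inclusion_exclusion_alt sets = ((pvUnion (sets.map List.toFinset)).card : Int) := by
  obtain ⟨h1, h2⟩ := pv_union_chain sets PySem.Set.empty (by simp [PySem.Set.empty])
  show ((sets.foldl (fun union s => PySem.Set.union union s) (PySem.Set.empty : PySem.Set Int)).length : Int) = _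
  rw [← List.toFinset_card_of_nodup h1, h2]
  simp [PySem.Set.empty]

-- ===== VERDICT (by name: the statement is the Claim_ definition above) =====
theorem inclusion_exclusion_spec : Claim_equal_inclusion_exclusion := by
  intro sets _ hpre
  unfold Spec_inclusion_exclusion
  rw [pv_A_eq sets hpre, pv_B_eq sets, pv_sublists_sum]
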